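-- pv_equiv track=rewrite | github.com/lamngue/Competitive-Programming | Two pointers/georgeAndRound.py | check
-- ===== SOURCE A (Python) =====
-- def check(good, probs):
--     count = 0
--     n = len(good)
--     m = len(probs)
--     j = 0
--     while (j < m):
--         if count < n and probs[j] >= good[count]:
--             count += 1
--         j += 1
--     return count
-- ===== SOURCE B (Python) =====
-- def check(good, probs):
--     # Binary search for the largest k such that good[:k] embeds into probs
--     # (order-preserving, each matched prob >= its good); embeddability is
--     # tested by a backward scan over probs.
--     def feasible(req):
--         i = len(req) - 1
--         for p in reversed(probs):
--             if i >= 0 and req[i] <= p: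
--                 i -= 1
--         return i < 0
--
--     lo, hi = 0, len(good)
--     while lo < hi:
--         mid = (lo + hi + 1) // 2
--         if feasible(good[:mid]):
--             lo = mid
--         else:
--             hi = mid - 1
--     return lo
-- ===== Notes on version B (the rewrite author's own statement) =====
-- stated objective: alternative
-- what changed: B binary-searches the largest k for which the prefix good[:k] embeds order-preservingly into probs (each matched prob >= its difficulty), testing embeddability with a backward scan over probs, instead of A's single forward pass that counts greedy matches.
import Mathlib
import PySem

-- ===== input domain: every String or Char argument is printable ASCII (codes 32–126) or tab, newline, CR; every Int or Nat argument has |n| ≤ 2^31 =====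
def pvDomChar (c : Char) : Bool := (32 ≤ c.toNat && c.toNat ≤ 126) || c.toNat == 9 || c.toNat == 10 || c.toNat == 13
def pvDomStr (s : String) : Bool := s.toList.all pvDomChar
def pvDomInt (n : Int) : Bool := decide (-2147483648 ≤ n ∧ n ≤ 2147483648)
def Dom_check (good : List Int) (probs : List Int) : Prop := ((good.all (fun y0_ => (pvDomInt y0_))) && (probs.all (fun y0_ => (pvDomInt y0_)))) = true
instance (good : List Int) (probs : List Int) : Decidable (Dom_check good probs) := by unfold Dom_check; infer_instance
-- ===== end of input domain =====

-- B binary-searches the largest k such that good[:k] embeds (order-preserving, each matched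
-- prob ≥ its difficulty) into probs, testing embeddability by a backward scan over probs,
-- instead of A's single forward pass counting matches; alternative algorithm, same results.

-- ===== PORT A =====
-- the while loop over j: structural recursion on the remaining suffix of probs, state = count
def checkLoopA (good : List Int) : List Int → Int → Int
  | [], count => count
  | p :: rest, count =>
    checkLoopA good rest
      (if count < (good.length : Int) ∧ ((PySem.List.pyGet? good count).getD 0) ≤ p
       then count + 1 else count)

def check (good : List Int) (probs : List Int) : Int := checkLoopA good probs 0

-- ===== PORT B =====
-- body of `for p in reversed(probs)`: state = i, the index of the last still-unmatched req element
def feasStep (req : List Int) (i : Int) (p : Int) : Int :=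
  if 0 ≤ i ∧ ((PySem.List.pyGet? req i).getD 0) ≤ p then i - 1 else i

-- feasible(req): backward scan over probs; i starts at len(req)-1, success iff i < 0 at the end
def feasible (req : List Int) (probs : List Int) : Bool :=
  decide (probs.reverse.foldl (feasStep req) ((req.length : Int) - 1) < 0)

-- the binary-search while loop (all quantities are nonnegative in Source B, so Nat with floor `/` is exact)
def bsearch (good : List Int) (probs : List Int) (lo hi : Nat) : Nat :=
  if _h : lo < hi then
    let mid := (lo + hi + 1) / 2
    if feasible (good.take mid) probs then bsearch good probs mid hi
    else bsearch good probs lo (mid - 1)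
  else lo
termination_by hi - lo
decreasing_by
  · omega
  · omega

def check_alt (good : List Int) (probs : List Int) : Int :=
  (bsearch good probs 0 good.length : Int)

-- ===== PRECONDITION & SPEC =====
def Spec_check (good : List Int) (probs : List Int) (out : Int) : Prop := out = check_alt good probs
instance (good : List Int) (probs : List Int) (out : Int) : Decidable (Spec_check good probs out) := by unfold Spec_check; infer_instance

-- ===== CLAIM (what is proved, stated in full; the proofs are below) =====
def Claim_equal_check : Prop := ∀ (good : List Int) (probs : List Int), Dom_check good probs → Spec_check good probs (check good probs)

-- ===== LEMMAS AND PROOFS =====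

-- reference greedy matcher: does gs embed into ps (in order, each gs element ≤ its match)?
def matchable : List Int → List Int → Bool
  | [], _ => true
  | _ :: _, [] => false
  | g :: gs, p :: ps => if g ≤ p then matchable gs ps else matchable (g :: gs) ps

-- reference count: A's greedy match count as a clean structural recursion
def gcount : List Int → List Int → Nat
  | _, [] => 0
  | [], _ :: _ => 0
  | g :: gs, p :: ps => if g ≤ p then gcount gs ps + 1 else gcount (g :: gs) ps

lemma gcount_nil_left : ∀ ps, gcount [] ps = 0
  | [] => rfl
  | _ :: _ => rfl

lemma gcount_le_length : ∀ (ps gs : List Int), gcount gs ps ≤ gs.length := by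
  intro ps
  induction ps with
  | nil => intro gs; cases gs <;> simp [gcount]
  | cons p pr ih =>
    intro gs
    cases gs with
    | nil => simp [gcount]
    | cons g gt =>
      by_cases h : g ≤ p
      · simpa [gcount, h] using ih gt
      · simpa [gcount, h] using ih (g :: gt)

-- A's loop computes gcount of the not-yet-consumed suffix of good
lemma checkLoopA_eq_gcount (ps : List Int) : ∀ (good : List Int) (c : Int), 0 ≤ c →
    checkLoopA good ps c = c + (gcount (good.drop c.toNat) ps : Int) := by
  induction ps with
  | nil =>
    intro good c _
    simp [checkLoopA, gcount]
  | cons p rest ih =>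
    intro good c hc
    by_cases h : c < (good.length : Int)
    · have hlt : c.toNat < good.length := by omega
      have hget : PySem.List.pyGet? good c = good[c.toNat]? := by
        simp [PySem.List.pyGet?, PySem.List.pyIdx?, hc, h]
      have hsome : good[c.toNat]? = some (good[c.toNat]) := List.getElem?_eq_getElem hlt
      have hdrop : good.drop c.toNat = good[c.toNat] :: good.drop (c.toNat + 1) :=
        List.drop_eq_getElem_cons hlt
      by_cases hge : good[c.toNat] ≤ p
      · have hstep : checkLoopA good (p :: rest) c = checkLoopA good rest (c + 1) := by
          simp [checkLoopA, h, hge, hget, hsome]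
        rw [hstep, ih good (c + 1) (by omega)]
        have ht : (c + 1).toNat = c.toNat + 1 := by omega
        rw [ht, hdrop]
        simp [gcount, hge]
        ring
      · have hlt' : p < good[c.toNat] := not_le.mp hge
        have hstep : checkLoopA good (p :: rest) c = checkLoopA good rest c := by
          simp [checkLoopA, hget, hsome, hge]
        rw [hstep, ih good c hc, hdrop]
        simp [gcount, hge]
    · have hdrop : good.drop c.toNat = [] := by
        apply List.drop_eq_nil_of_le; omega
      have hstuck : ∀ qs, checkLoopA good qs c = c := by
        intro qs
        induction qs with
        | nil => rfl
        | cons q qr ihq => simp [checkLoopA, h, ihq]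
      rw [hstuck, hdrop]
      simp [gcount]

-- greedy success ⟺ an embedding exists
lemma matchable_iff_embeds : ∀ (ps gs : List Int),
    matchable gs ps = true ↔ ∃ sub, sub.Sublist ps ∧ List.Forall₂ (· ≤ ·) gs sub := by
  intro ps
  induction ps with
  | nil =>
    intro gs
    cases gs with
    | nil => simp [matchable]
    | cons g gt =>
      refine iff_of_false (by simp [matchable]) ?_
      rintro ⟨sub, hsub, hf⟩
      have hn : sub = [] := List.sublist_nil.mp hsub
      subst hn
      cases hf
  | cons p pr ih =>
    intro gs
    cases gs with
    | nil =>
      simp only [matchable, true_iff]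
      exact ⟨[], List.nil_sublist _, List.Forall₂.nil⟩
    | cons g gt =>
      by_cases h : g ≤ p
      · simp only [matchable, if_pos h]
        constructor
        · intro hm
          obtain ⟨sub, hsub, hf⟩ := (ih gt).mp hm
          exact ⟨p :: sub, List.Sublist.cons₂ p hsub, List.Forall₂.cons h hf⟩
        · rintro ⟨sub, hsub, hf⟩
          cases hf with
          | @cons _ s0 _ st hgs0 hft =>
            have hst : st.Sublist pr := by
              cases hsub with
              | cons _ htail => exact (List.sublist_cons_self s0 st).trans htail
              | cons₂ _ htail => exact htail
            exact (ih gt).mpr ⟨st, hst, hft⟩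
      · simp only [matchable, if_neg h]
        rw [ih (g :: gt)]
        constructor
        · rintro ⟨sub, hsub, hf⟩
          exact ⟨sub, hsub.trans (List.sublist_cons_self p pr), hf⟩
        · rintro ⟨sub, hsub, hf⟩
          cases hf with
          | @cons _ s0 _ st hgs0 hft =>
            cases hsub with
            | cons _ htail => exact ⟨s0 :: st, htail, List.Forall₂.cons hgs0 hft⟩
            | cons₂ _ htail => exact absurd hgs0 h  -- s0 = p would give g ≤ p

-- embedding is invariant under reversing both lists, hence so is greedy success
lemma matchable_reverse (gs ps : List Int) :
    matchable gs.reverse ps.reverse = matchable gs ps := by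
  rw [Bool.eq_iff_iff, matchable_iff_embeds, matchable_iff_embeds]
  constructor
  · rintro ⟨sub, hsub, hf⟩
    refine ⟨sub.reverse, ?_, ?_⟩
    · simpa using hsub.reverse
    · have := List.rel_reverse (R := (· ≤ · : Int → Int → Prop)) hf
      simpa using this
  · rintro ⟨sub, hsub, hf⟩
    exact ⟨sub.reverse, hsub.reverse, List.rel_reverse hf⟩

-- the foldl never escapes a negative state
lemma foldl_feasStep_neg (req : List Int) : ∀ (qs : List Int) (i : Int), i < 0 →
    qs.foldl (feasStep req) i = i := by
  intro qs
  induction qs with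
  | nil => intro i _; rfl
  | cons q qr ih =>
    intro i hi
    have : feasStep req i q = i := by simp [feasStep]; omega
    simp [List.foldl, this, ih i hi]

-- B's backward scan is the greedy matcher run on the reversed prefix
lemma foldl_feasStep_eq_matchable (req : List Int) : ∀ (qs : List Int) (k : Nat), k ≤ req.length →
    (decide (qs.foldl (feasStep req) ((k : Int) - 1) < 0) = matchable ((req.take k).reverse) qs) := by
  intro qs
  induction qs with
  | nil =>
    intro k hk
    cases k with
    | zero => simp [matchable]
    | succ j =>
      have hne : req.take (j + 1) ≠ [] := by
        intro hnil
        have hl : min (j + 1) req.length = 0 := by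
          simpa using congrArg List.length hnil
        omega
      have hrne : (req.take (j + 1)).reverse ≠ [] := by simpa using hne
      obtain ⟨x, xs, hx⟩ := List.exists_cons_of_ne_nil hrne
      rw [hx]
      simp only [List.foldl, matchable]
      simp
  | cons q qr ih =>
    intro k hk
    cases k with
    | zero =>
      simp only [List.foldl, Nat.cast_zero, zero_sub]
      rw [show feasStep req (-1) q = -1 from by norm_num [feasStep]]
      rw [foldl_feasStep_neg req qr (-1) (by norm_num)]
      simp [matchable]
    | succ j =>
      have hj : j < req.length := by omega
      have hget : PySem.List.pyGet? req (j : Int) = some req[j] := by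
        simp [PySem.List.pyGet?, PySem.List.pyIdx?, hj]
      have htake : req.take (j + 1) = req.take j ++ [req[j]] := by
        rw [List.take_add_one]
        simp [List.getElem?_eq_getElem hj]
      have hrev : (req.take (j + 1)).reverse = req[j] :: (req.take j).reverse := by
        rw [htake]; simp
      by_cases hle : req[j] ≤ q
      · have hstep : feasStep req ((j : Int) + 1 - 1) q = (j : Int) - 1 := by
          simp [feasStep, hget, hle]
        simp only [List.foldl]
        push_cast
        rw [hstep, hrev]
        simp only [matchable, if_pos hle]
        exact ih j (by omega)
      · have hstep : feasStep req ((j : Int) + 1 - 1) q = (j : Int) := by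
          simp [feasStep, hget, hle]
        simp only [List.foldl]
        push_cast
        rw [hstep, hrev]
        simp only [matchable, if_neg hle]
        have hmain := ih (j + 1) hk
        rw [hrev] at hmain
        push_cast at hmain
        rw [show (j : Int) = (j : Int) + 1 - 1 from by ring]
        exact hmain

lemma feasible_eq_matchable (req probs : List Int) :
    feasible req probs = matchable req probs := by
  unfold feasible
  rw [foldl_feasStep_eq_matchable req probs.reverse req.length le_rfl]
  rw [List.take_length]
  calc matchable req.reverse probs.reverse = matchable req.reverse.reverse probs.reverse.reverse := (matchable_reverse _ _).symm
    _ = matchable req probs := by simp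

-- a prefix of good embeds iff its length is at most the greedy count
lemma take_matchable_iff (ps : List Int) : ∀ (gs : List Int) (k : Nat), k ≤ gs.length →
    (matchable (gs.take k) ps = true ↔ k ≤ gcount gs ps) := by
  induction ps with
  | nil =>
    intro gs k hk
    cases gs with
    | nil =>
      have hk0 : k = 0 := by simpa using hk
      subst hk0
      simp [matchable, gcount]
    | cons g gt =>
      cases k with
      | zero => simp [matchable, gcount]
      | succ j => simp [matchable, gcount]
  | cons p pr ih =>
    intro gs k hk
    cases gs with
    | nil =>
      have hk0 : k = 0 := by simpa using hk
      subst hk0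
      simp [matchable, gcount_nil_left]
    | cons g gt =>
      cases k with
      | zero => simp [matchable]
      | succ j =>
        simp only [List.take_succ_cons]
        by_cases h : g ≤ p
        · simp only [matchable, gcount, if_pos h]
          rw [ih gt j (by simpa using hk)]
          omega
        · simp only [matchable, gcount, if_neg h]
          have := ih (g :: gt) (j + 1) hk
          simpa using this

lemma feasible_take_iff (good probs : List Int) (k : Nat) (hk : k ≤ good.length) :
    feasible (good.take k) probs = true ↔ k ≤ gcount good probs := by
  rw [feasible_eq_matchable, take_matchable_iff probs good k hk]

lemma bsearch_eq (good probs : List Int) : ∀ (lo hi : Nat),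
    lo ≤ gcount good probs → gcount good probs ≤ hi → hi ≤ good.length →
    bsearch good probs lo hi = gcount good probs := by
  intro lo hi
  fun_induction bsearch good probs lo hi with
  | case1 lo hi h mid hfeas ihrec =>
    intro hlo hhi hlen
    have hmiddef : mid = (lo + hi + 1) / 2 := rfl
    have hmidle : mid ≤ good.length := by omega
    exact ihrec ((feasible_take_iff good probs mid hmidle).mp hfeas) hhi hlen
  | case2 lo hi h mid hfeas ihrec =>
    intro hlo hhi hlen
    have hmiddef : mid = (lo + hi + 1) / 2 := rfl
    have hmidle : mid ≤ good.length := by omega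
    have hnot : ¬ mid ≤ gcount good probs := fun hle =>
      hfeas ((feasible_take_iff good probs mid hmidle).mpr hle)
    exact ihrec hlo (by omega) (by omega)
  | case3 lo hi h =>
    intro hlo hhi _
    omega

-- ===== VERDICT (by name: the statement is the Claim_ definition above) =====
theorem check_spec : Claim_equal_check := by
  intro good probs _
  unfold Spec_check check check_alt
  rw [checkLoopA_eq_gcount probs good 0 le_rfl]
  rw [bsearch_eq good probs 0 good.length (Nat.zero_le _) (gcount_le_length probs good) le_rfl]
  simp
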